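-- pv_equiv track=rewrite | github.com/Pakshal-Nagda/anchored-decoding | copy-bench-main/scripts/eval_literal_copying.py | _word_acs
-- ===== SOURCE A (Python) =====
-- def _word_acs(words1, words2):
--     """Word-level Accumulated Common Substrings.
--
--     Greedily sums lengths of non-overlapping maximal common word substrings,
--     longest first.
--     """
--     m, n = len(words1), len(words2)
--     if m == 0 or n == 0:
--         return 0
--
--     dp = [[0] * (n + 1) for _ in range(m + 1)]
--     matches = []
--     for i in range(1, m + 1):
--         for j in range(1, n + 1):
--             if words1[i - 1] == words2[j - 1]:
--                 dp[i][j] = dp[i - 1][j - 1] + 1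
--             if dp[i][j] > 0:
--                 matches.append((dp[i][j], i - 1, j - 1))
--
--     matches.sort(key=lambda x: -x[0])
--     used1, used2 = set(), set()
--     total = 0
--     for length, end1, end2 in matches:
--         start1, start2 = end1 - length + 1, end2 - length + 1
--         range1 = set(range(start1, end1 + 1))
--         range2 = set(range(start2, end2 + 1))
--         if not range1 & used1 and not range2 & used2:
--             total += length
--             used1 |= range1
--             used2 |= range2
--     return total
-- ===== SOURCE B (Python) =====
-- def _word_acs(words1, words2):
--     """Word-level Accumulated Common Substrings, by repeated longest-first pick.
--
--     No dp table and no sort: for every matching word pair the maximal common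
--     suffix run is measured directly by walking backwards, and then the loop
--     literally does what the docstring says: repeatedly scan all candidates for
--     the longest one whose word ranges are still completely free (first in
--     (i, j) order on ties), take it, and mark its ranges used.
--     """
--     cands = []
--     for i in range(len(words1)):
--         for j in range(len(words2)):
--             if words1[i] == words2[j]:
--                 k = 1
--                 while k <= i and k <= j and words1[i - k] == words2[j - k]:
--                     k += 1
--                 cands.append((k, i, j))
--     used1, used2 = set(), set()
--     total = 0
--     while True:
--         best = None
--         for k, i, j in cands:
--             if best is not None and k <= best[0]:
--                 continue
--             if all(t not in used1 for t in range(i - k + 1, i + 1)) and all(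
--                 t not in used2 for t in range(j - k + 1, j + 1)
--             ):
--                 best = (k, i, j)
--         if best is None:
--             break
--         k, i, j = best
--         total += k
--         used1.update(range(i - k + 1, i + 1))
--         used2.update(range(j - k + 1, j + 1))
--     return total
-- ===== Notes on version B (the rewrite author's own statement) =====
-- stated objective: alternative
-- what changed: Drops the dp table and the sort entirely: each matching word pair's maximal common run is measured directly by a backward walk, and selection repeatedly re-scans all candidates for the longest one whose ranges are still free (first occurrence on ties) instead of a single pass over a sorted match list.
import Mathlib
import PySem

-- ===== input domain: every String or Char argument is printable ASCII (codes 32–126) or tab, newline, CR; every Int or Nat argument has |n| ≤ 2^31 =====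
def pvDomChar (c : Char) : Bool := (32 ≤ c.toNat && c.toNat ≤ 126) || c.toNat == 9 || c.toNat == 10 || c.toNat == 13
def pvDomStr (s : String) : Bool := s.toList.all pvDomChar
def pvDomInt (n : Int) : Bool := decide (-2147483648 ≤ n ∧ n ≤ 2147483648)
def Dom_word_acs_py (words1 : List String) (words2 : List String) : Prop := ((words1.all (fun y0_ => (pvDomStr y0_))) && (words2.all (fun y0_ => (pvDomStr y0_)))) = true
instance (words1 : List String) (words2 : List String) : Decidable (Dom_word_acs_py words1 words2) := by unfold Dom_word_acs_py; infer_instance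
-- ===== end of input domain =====

-- B drops A's dp table and its sort entirely: it measures each matching pair's maximal
-- common run by a direct backward walk, then repeatedly re-scans all candidates for the
-- longest still-free one (first occurrence on ties): an alternative, not claimed faster.

-- ===== PORT A =====
-- List indices in A are provably in range and non-negative, so list reads are ported
-- with PySem.List.pyGetD (exact for in-range indices) and writes with List.set.
def word_acs_py (words1 : List String) (words2 : List String) : Int :=
  let m : Int := (words1.length : Int)
  let n : Int := (words2.length : Int)
  if m = 0 ∨ n = 0 then 0
  else
    let dp0 : List (List Int) := List.replicate (m + 1).toNat (List.replicate (n + 1).toNat 0)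
    let st :=
      (PySem.List.pyRange 1 (m + 1) 1).foldl (fun st i =>
        (PySem.List.pyRange 1 (n + 1) 1).foldl
          (fun (st : List (List Int) × List (Int × Int × Int)) j =>
            let dp := st.1
            let ms := st.2
            let dp :=
              if PySem.List.pyGetD words1 (i - 1) "" = PySem.List.pyGetD words2 (j - 1) "" then
                dp.set i.toNat ((PySem.List.pyGetD dp i []).set j.toNat
                  (PySem.List.pyGetD (PySem.List.pyGetD dp (i - 1) []) (j - 1) 0 + 1))
              else dp
            let cell := PySem.List.pyGetD (PySem.List.pyGetD dp i []) j 0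
            if 0 < cell then (dp, ms ++ [(cell, i - 1, j - 1)]) else (dp, ms))
          st) (dp0, ([] : List (Int × Int × Int)))
    let sortedM := PySem.List.sorted st.2 (fun x => -x.1) false
    let fin := sortedM.foldl (fun (g : PySem.Set Int × PySem.Set Int × Int) t =>
        let length := t.1
        let end1 := t.2.1
        let end2 := t.2.2
        let start1 := end1 - length + 1
        let start2 := end2 - length + 1
        let range1 : PySem.Set Int := PySem.Set.ofList (PySem.List.pyRange start1 (end1 + 1) 1)
        let range2 : PySem.Set Int := PySem.Set.ofList (PySem.List.pyRange start2 (end2 + 1) 1)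
        if (PySem.Set.inter range1 g.1).isEmpty && (PySem.Set.inter range2 g.2.1).isEmpty then
          (PySem.Set.union g.1 range1, PySem.Set.union g.2.1 range2, g.2.2 + length)
        else g)
      (PySem.Set.empty, PySem.Set.empty, (0 : Int))
    fin.2.2

-- ===== PORT B =====
-- B's inner while loop: k = 1; while k <= i and k <= j and words1[i-k] == words2[j-k]: k += 1
def pvRunAux (w1 w2 : List String) (i j k : Int) : Int :=
  if h : k ≤ i ∧ k ≤ j ∧ PySem.List.pyGetD w1 (i - k) "" = PySem.List.pyGetD w2 (j - k) "" then
    pvRunAux w1 w2 i j (k + 1)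
  else k
termination_by (i + 1 - k).toNat
decreasing_by
  have _hk1 : k ≤ i := h.1
  omega

-- the overlap test of B's scan: all(t not in used for t in range(...)) for both ranges
def pvFree (g : PySem.Set Int × PySem.Set Int × Int) (x : Int × Int × Int) : Bool :=
  (PySem.List.pyRange (x.2.1 - x.1 + 1) (x.2.1 + 1) 1).all (fun t => !(PySem.Set.contains g.1 t)) &&
  (PySem.List.pyRange (x.2.2 - x.1 + 1) (x.2.2 + 1) 1).all (fun t => !(PySem.Set.contains g.2.1 t))

-- taking the chosen candidate: total += k; used1.update(...); used2.update(...)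
def pvApply (g : PySem.Set Int × PySem.Set Int × Int) (x : Int × Int × Int) :
    PySem.Set Int × PySem.Set Int × Int :=
  (PySem.Set.update g.1 (PySem.List.pyRange (x.2.1 - x.1 + 1) (x.2.1 + 1) 1),
   PySem.Set.update g.2.1 (PySem.List.pyRange (x.2.2 - x.1 + 1) (x.2.2 + 1) 1),
   g.2.2 + x.1)

-- one step of B's scan over cands: 'if best is not None and k <= best[0]: continue; if free: best = x'
def pvScanStep (free : (Int × Int × Int) → Bool) (best : Option (Int × Int × Int))
    (x : Int × Int × Int) : Option (Int × Int × Int) :=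
  match best with
  | some b => if x.1 ≤ b.1 then some b else if free x then some x else some b
  | none => if free x then some x else none

def pvScan (g : PySem.Set Int × PySem.Set Int × Int) (cands : List (Int × Int × Int)) :
    Option (Int × Int × Int) :=
  cands.foldl (pvScanStep (pvFree g)) none

-- B's 'while True' loop; the fuel (cands.length + 1) only makes it total: each pass either
-- breaks or falsifies pvFree for at least one candidate, so the fuel is never exhausted.
def pvSelectLoop (cands : List (Int × Int × Int)) :
    Nat → PySem.Set Int × PySem.Set Int × Int → PySem.Set Int × PySem.Set Int × Int
  | 0, g => g
  | fuel + 1, g =>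
    match pvScan g cands with
    | none => g
    | some x => pvSelectLoop cands fuel (pvApply g x)

def word_acs_py_alt (words1 : List String) (words2 : List String) : Int :=
  let cands :=
    (PySem.List.pyRange 0 (PySem.List.len words1) 1).foldl (fun cs i =>
      (PySem.List.pyRange 0 (PySem.List.len words2) 1).foldl (fun cs j =>
        if PySem.List.pyGetD words1 i "" = PySem.List.pyGetD words2 j "" then
          cs ++ [(pvRunAux words1 words2 i j 1, i, j)]
        else cs) cs) ([] : List (Int × Int × Int))
  (pvSelectLoop cands (cands.length + 1) (PySem.Set.empty, PySem.Set.empty, (0 : Int))).2.2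

-- ===== PRECONDITION & SPEC =====
def Spec_word_acs_py (words1 : List String) (words2 : List String) (out : Int) : Prop := out = word_acs_py_alt words1 words2
instance (words1 : List String) (words2 : List String) (out : Int) : Decidable (Spec_word_acs_py words1 words2 out) := by unfold Spec_word_acs_py; infer_instance

-- ===== CLAIM (what is proved, stated in full; the proofs are below) =====
def Claim_equal_word_acs_py : Prop := ∀ (words1 : List String) (words2 : List String), Dom_word_acs_py words1 words2 → Spec_word_acs_py words1 words2 (word_acs_py words1 words2)

-- ===== LEMMAS AND PROOFS =====

def pvZeroRow (n : Nat) : List Int := List.replicate (n + 1) 0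

def pvNextRow (w2 : List String) (prev : List Int) (w : String) : List Int :=
  0 :: (List.range w2.length).map (fun j => if w = w2.getD j "" then prev.getD j 0 + 1 else 0)

def pvRowUpTo (w2 : List String) (prev : List Int) (w : String) (c : Nat) : List Int :=
  (pvNextRow w2 prev w).take (c + 1) ++ List.replicate (w2.length - c) 0

theorem pvNextRow_length (w2 : List String) (prev : List Int) (w : String) :
    (pvNextRow w2 prev w).length = w2.length + 1 := by simp [pvNextRow]

theorem pvRowUpTo_zero (w2 : List String) (prev : List Int) (w : String) :
    pvRowUpTo w2 prev w 0 = pvZeroRow w2.length := by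
  simp [pvRowUpTo, pvNextRow, pvZeroRow, List.replicate_succ]

theorem pvRowUpTo_last (w2 : List String) (prev : List Int) (w : String) :
    pvRowUpTo w2 prev w w2.length = pvNextRow w2 prev w := by
  rw [pvRowUpTo, Nat.sub_self]
  simp [List.take_of_length_le, pvNextRow_length]

theorem pvNextRow_getD_succ (w2 : List String) (prev : List Int) (w : String) (c : Nat) (hc : c < w2.length) :
    (pvNextRow w2 prev w).getD (c + 1) 0 = if w = w2.getD c "" then prev.getD c 0 + 1 else 0 := by
  simp [pvNextRow, List.getD_eq_getElem?_getD, hc]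

theorem pvTakeLen (w2 : List String) (prev : List Int) (w : String) (c : Nat) (hc : c < w2.length) :
    ((pvNextRow w2 prev w).take (c + 1)).length = c + 1 := by
  simp [pvNextRow_length]; omega

theorem pvRowUpTo_getD_succ_self (w2 : List String) (prev : List Int) (w : String) (c : Nat) (hc : c < w2.length) :
    (pvRowUpTo w2 prev w c).getD (c + 1) 0 = 0 := by
  have hl := pvTakeLen w2 prev w c hc
  have h0 : 0 < w2.length - c := by omega
  rw [pvRowUpTo, List.getD_eq_getElem?_getD, List.getElem?_append_right (by omega)]
  simp [hl, h0]

theorem pvRowUpTo_succ (w2 : List String) (prev : List Int) (w : String) (c : Nat) (hc : c < w2.length) :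
    pvRowUpTo w2 prev w (c + 1)
      = (pvNextRow w2 prev w).take (c + 1) ++ (pvNextRow w2 prev w).getD (c + 1) 0 :: List.replicate (w2.length - (c + 1)) 0 := by
  have hlt : c + 1 < (pvNextRow w2 prev w).length := by rw [pvNextRow_length]; omega
  rw [pvRowUpTo, List.getD_eq_getElem?_getD, List.getElem?_eq_getElem hlt]
  conv_lhs => rw [← List.take_concat_get (h := hlt)]
  simp only [Option.getD_some, List.concat_eq_append, List.append_assoc, List.cons_append,
    List.nil_append]

theorem pvRowUpTo_set (w2 : List String) (prev : List Int) (w : String) (c : Nat) (hc : c < w2.length) :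
    (pvRowUpTo w2 prev w c).set (c + 1) ((pvNextRow w2 prev w).getD (c + 1) 0)
      = pvRowUpTo w2 prev w (c + 1) := by
  have hl := pvTakeLen w2 prev w c hc
  have hrep : List.replicate (w2.length - c) (0:Int) = 0 :: List.replicate (w2.length - (c+1)) 0 := by
    rw [← List.replicate_succ]; congr 1; omega
  rw [pvRowUpTo, List.set_append_right _ _ (by omega), hrep, hl, Nat.sub_self, List.set_cons_zero,
    pvRowUpTo_succ w2 prev w c hc]

theorem pvRowUpTo_skip (w2 : List String) (prev : List Int) (w : String) (c : Nat) (hc : c < w2.length)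
    (h0 : (pvNextRow w2 prev w).getD (c + 1) 0 = 0) :
    pvRowUpTo w2 prev w c = pvRowUpTo w2 prev w (c + 1) := by
  have hrep : List.replicate (w2.length - c) (0:Int) = 0 :: List.replicate (w2.length - (c+1)) 0 := by
    rw [← List.replicate_succ]; congr 1; omega
  rw [pvRowUpTo, hrep, pvRowUpTo_succ w2 prev w c hc, h0]

def pvRowAt (w1 w2 : List String) : Nat → List Int
  | 0 => pvZeroRow w2.length
  | r + 1 => pvNextRow w2 (pvRowAt w1 w2 r) (w1.getD r "")

def pvMatchRow (w2 : List String) (prev : List Int) (w : String) (i : Int) : List (Int × Int × Int) :=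
  ((List.range w2.length).filter (fun j => w = w2.getD j "")).map
    (fun j => (prev.getD j 0 + 1, i, (j : Int)))

def pvMRowTo (w2 : List String) (prev : List Int) (w : String) (i : Int) (c : Nat) : List (Int × Int × Int) :=
  ((List.range c).filter (fun j => w = w2.getD j "")).map
    (fun j => (prev.getD j 0 + 1, i, (j : Int)))

def pvFlatTo (w1 w2 : List String) (r : Nat) : List (Int × Int × Int) :=
  (List.range r).flatMap (fun i => pvMatchRow w2 (pvRowAt w1 w2 i) (w1.getD i "") (i : Int))

def pvM (w1 w2 : List String) : List (Int × Int × Int) := pvFlatTo w1 w2 w1.length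

def pvMidRows (w1 w2 : List String) (r : Nat) (row : List Int) : List (List Int) :=
  (List.range (r + 1)).map (pvRowAt w1 w2) ++ row :: List.replicate (w1.length - (r + 1)) (pvZeroRow w2.length)

def pvDpAt (w1 w2 : List String) (r : Nat) : List (List Int) :=
  (List.range (r + 1)).map (pvRowAt w1 w2) ++ List.replicate (w1.length - r) (pvZeroRow w2.length)

theorem pvGetD_nonneg (l : List Int) (j : Nat) (h : ∀ x ∈ l, 0 ≤ x) : 0 ≤ l.getD j 0 := by
  rcases lt_or_ge j l.length with hj | hj
  · rw [List.getD_eq_getElem?_getD, List.getElem?_eq_getElem hj]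
    exact h _ (List.getElem_mem hj)
  · rw [List.getD_eq_getElem?_getD, List.getElem?_eq_none (by simpa using hj)]
    simp

theorem pvRowAt_mem_nonneg (w1 w2 : List String) (r : Nat) : ∀ x ∈ pvRowAt w1 w2 r, 0 ≤ x := by
  induction r with
  | zero =>
    intro x hx
    rw [pvRowAt, pvZeroRow] at hx
    simp [List.eq_of_mem_replicate hx]
  | succ r ih =>
    intro x hx
    rw [pvRowAt, pvNextRow] at hx
    rcases List.mem_cons.mp hx with h | h
    · simp [h]
    · obtain ⟨j, hj, he⟩ := List.mem_map.mp h
      have hg := pvGetD_nonneg (pvRowAt w1 w2 r) j ih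
      rw [← he]
      split <;> omega

theorem pvRowAt_nonneg (w1 w2 : List String) (r j : Nat) : 0 ≤ (pvRowAt w1 w2 r).getD j 0 :=
  pvGetD_nonneg _ _ (pvRowAt_mem_nonneg w1 w2 r)

theorem pvMidRows_getD_r (w1 w2 : List String) (r : Nat) (row : List Int) :
    (pvMidRows w1 w2 r row).getD r [] = pvRowAt w1 w2 r := by
  rw [pvMidRows, List.getD_eq_getElem?_getD, List.getElem?_append_left (by simp)]
  simp

theorem pvMidRows_getD_succ (w1 w2 : List String) (r : Nat) (row : List Int) :
    (pvMidRows w1 w2 r row).getD (r + 1) [] = row := by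
  rw [pvMidRows, List.getD_eq_getElem?_getD, List.getElem?_append_right (by simp)]
  simp

theorem pvMidRows_set (w1 w2 : List String) (r : Nat) (row row' : List Int) :
    (pvMidRows w1 w2 r row).set (r + 1) row' = pvMidRows w1 w2 r row' := by
  rw [pvMidRows, List.set_append_right _ _ (by simp)]
  simp [pvMidRows]

theorem pvDpAt_zero (w1 w2 : List String) :
    pvDpAt w1 w2 0 = List.replicate (w1.length + 1) (pvZeroRow w2.length) := by
  rw [pvDpAt]
  cases hm : w1.length with
  | zero => simp [pvRowAt]
  | succ m => simp [pvRowAt, List.replicate_succ]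

theorem pvDpAt_eq_mid (w1 w2 : List String) (r : Nat) (hr : r < w1.length) :
    pvDpAt w1 w2 r = pvMidRows w1 w2 r (pvZeroRow w2.length) := by
  rw [pvDpAt, pvMidRows]
  congr 1
  rw [show w1.length - r = (w1.length - (r + 1)) + 1 by omega, List.replicate_succ]

theorem pvMidRows_last (w1 w2 : List String) (r : Nat) :
    pvMidRows w1 w2 r (pvRowAt w1 w2 (r + 1)) = pvDpAt w1 w2 (r + 1) := by
  rw [pvMidRows, pvDpAt, List.range_succ (n := r + 1), List.map_append]
  simp

def pvABody (w1 w2 : List String) (i : Int) (st : List (List Int) × List (Int × Int × Int)) (j : Int) :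
    List (List Int) × List (Int × Int × Int) :=
  let dp := st.1
  let ms := st.2
  let dp :=
    if PySem.List.pyGetD w1 (i - 1) "" = PySem.List.pyGetD w2 (j - 1) "" then
      dp.set i.toNat ((PySem.List.pyGetD dp i []).set j.toNat
        (PySem.List.pyGetD (PySem.List.pyGetD dp (i - 1) []) (j - 1) 0 + 1))
    else dp
  let cell := PySem.List.pyGetD (PySem.List.pyGetD dp i []) j 0
  if 0 < cell then (dp, ms ++ [(cell, i - 1, j - 1)]) else (dp, ms)

theorem pvRowUpTo_getD_succ_eq (w2 : List String) (prev : List Int) (w : String) (c : Nat)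
    (hc : c < w2.length) :
    (pvRowUpTo w2 prev w (c + 1)).getD (c + 1) 0 = (pvNextRow w2 prev w).getD (c + 1) 0 := by
  have hl := pvTakeLen w2 prev w c hc
  rw [pvRowUpTo_succ w2 prev w c hc, List.getD_eq_getElem?_getD,
    List.getElem?_append_right (by omega)]
  simp [hl]

theorem pvMRowTo_succ (w2 : List String) (prev : List Int) (w : String) (i : Int) (c : Nat) :
    pvMRowTo w2 prev w i (c + 1) =
      pvMRowTo w2 prev w i c ++
        (if w = w2.getD c "" then [(prev.getD c 0 + 1, i, (c : Int))] else []) := by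
  rw [pvMRowTo, pvMRowTo, List.range_succ, List.filter_append, List.map_append]
  congr 1
  split <;> simp_all

theorem pvAStep (w1 w2 : List String) (r c : Nat) (hc : c < w2.length)
    (ms : List (Int × Int × Int)) :
    pvABody w1 w2 ((r : Int) + 1)
        (pvMidRows w1 w2 r (pvRowUpTo w2 (pvRowAt w1 w2 r) (w1.getD r "") c), ms) ((c : Int) + 1)
      = (pvMidRows w1 w2 r (pvRowUpTo w2 (pvRowAt w1 w2 r) (w1.getD r "") (c + 1)),
         ms ++ (if w1.getD r "" = w2.getD c "" then
                  [((pvRowAt w1 w2 r).getD c 0 + 1, (r : Int), (c : Int))] else [])) := by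
  have er1 : ((r : Int) + 1) = ((r + 1 : Nat) : Int) := by push_cast; ring
  have ec1 : ((c : Int) + 1) = ((c + 1 : Nat) : Int) := by push_cast; ring
  have er2 : (((r + 1 : Nat) : Int) - 1) = (r : Int) := by push_cast; ring
  have ec2 : (((c + 1 : Nat) : Int) - 1) = (c : Int) := by push_cast; ring
  simp only [pvABody, er1, ec1, er2, ec2, PySem.List.pyGetD_natCast, Int.toNat_natCast,
    pvMidRows_getD_r, pvMidRows_getD_succ]
  by_cases heq : w1.getD r "" = w2.getD c ""
  · rw [if_pos heq]
    have hv : (pvNextRow w2 (pvRowAt w1 w2 r) (w1.getD r "")).getD (c + 1) 0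
        = (pvRowAt w1 w2 r).getD c 0 + 1 := by
      rw [pvNextRow_getD_succ _ _ _ c hc, if_pos heq]
    rw [show (pvRowAt w1 w2 r).getD c 0 + 1
        = (pvNextRow w2 (pvRowAt w1 w2 r) (w1.getD r "")).getD (c + 1) 0 from hv.symm,
      pvRowUpTo_set w2 _ _ c hc, pvMidRows_set, pvMidRows_getD_succ,
      pvRowUpTo_getD_succ_eq w2 _ _ c hc, hv]
    have hpos : 0 < (pvRowAt w1 w2 r).getD c 0 + 1 := by
      have := pvRowAt_nonneg w1 w2 r c; omega
    rw [if_pos hpos, if_pos heq]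
  · rw [if_neg heq]
    have h0 : (pvNextRow w2 (pvRowAt w1 w2 r) (w1.getD r "")).getD (c + 1) 0 = 0 := by
      rw [pvNextRow_getD_succ _ _ _ c hc, if_neg heq]
    rw [pvMidRows_getD_succ, ← pvRowUpTo_skip w2 _ _ c hc h0,
      pvRowUpTo_getD_succ_self w2 _ _ c hc]
    rw [if_neg heq, List.append_nil, if_neg (by omega : ¬ (0:Int) < 0),
      pvRowUpTo_skip w2 _ _ c hc h0]

theorem pvRange1 (n : Nat) :
    PySem.List.pyRange 1 ((n : Int) + 1) 1 = (List.range n).map (fun (k : Nat) => (k : Int) + 1) := by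
  by_cases hn : n = 0
  · subst hn; norm_num [PySem.List.pyRange]
  · rw [PySem.List.pyRange_of_pos _ _ (by norm_num), if_pos (by omega : (1:Int) < (n:Int) + 1)]
    have h1 : ((n : Int) + 1 - 1 + 1 - 1) / 1 = (n : Int) := by norm_num
    rw [h1, Int.toNat_natCast]
    exact List.map_congr_left (fun k _ => by ring)

theorem pvMRowTo_full (w2 : List String) (prev : List Int) (w : String) (i : Int) :
    pvMRowTo w2 prev w i w2.length = pvMatchRow w2 prev w i := rfl

theorem pvMRowTo_zero (w2 : List String) (prev : List Int) (w : String) (i : Int) :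
    pvMRowTo w2 prev w i 0 = [] := rfl

theorem pvFlatTo_succ (w1 w2 : List String) (r : Nat) :
    pvFlatTo w1 w2 (r + 1) =
      pvFlatTo w1 w2 r ++ pvMatchRow w2 (pvRowAt w1 w2 r) (w1.getD r "") (r : Int) := by
  rw [pvFlatTo, List.range_succ, List.flatMap_append]
  simp [pvFlatTo]

theorem pvAInner (w1 w2 : List String) (r : Nat)
    (ms : List (Int × Int × Int)) :
    ∀ c ≤ w2.length,
      (List.range c).foldl (fun st (k : Nat) => pvABody w1 w2 ((r : Int) + 1) st ((k : Int) + 1))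
        (pvMidRows w1 w2 r (pvRowUpTo w2 (pvRowAt w1 w2 r) (w1.getD r "") 0), ms)
      = (pvMidRows w1 w2 r (pvRowUpTo w2 (pvRowAt w1 w2 r) (w1.getD r "") c),
         ms ++ pvMRowTo w2 (pvRowAt w1 w2 r) (w1.getD r "") (r : Int) c) := by
  intro c
  induction c with
  | zero => intro _; simp [pvMRowTo_zero]
  | succ c ih =>
    intro hc
    rw [List.range_succ, List.foldl_append, ih (by omega), List.foldl_cons, List.foldl_nil,
      pvAStep w1 w2 r c (by omega), pvMRowTo_succ, List.append_assoc]

theorem pvAOuter (w1 w2 : List String) :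
    ∀ r ≤ w1.length,
      (List.range r).foldl
        (fun st (k : Nat) =>
          (List.range w2.length).foldl
            (fun st (c : Nat) => pvABody w1 w2 ((k : Int) + 1) st ((c : Int) + 1)) st)
        (pvDpAt w1 w2 0, ([] : List (Int × Int × Int)))
      = (pvDpAt w1 w2 r, pvFlatTo w1 w2 r) := by
  intro r
  induction r with
  | zero => intro _; simp [pvFlatTo]
  | succ r ih =>
    intro hr
    rw [List.range_succ, List.foldl_append, ih (by omega), List.foldl_cons, List.foldl_nil,
      pvDpAt_eq_mid w1 w2 r (by omega), ← pvRowUpTo_zero w2 (pvRowAt w1 w2 r) (w1.getD r ""),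
      pvAInner w1 w2 r _ w2.length (le_refl _),
      pvRowUpTo_last, pvMRowTo_full, ← pvFlatTo_succ]
    rw [show pvNextRow w2 (pvRowAt w1 w2 r) (w1.getD r "") = pvRowAt w1 w2 (r + 1) from rfl,
      pvMidRows_last]

def pvGreedyStep (g : PySem.Set Int × PySem.Set Int × Int) (t : Int × Int × Int) :
    PySem.Set Int × PySem.Set Int × Int :=
  if (PySem.Set.inter (PySem.Set.ofList (PySem.List.pyRange (t.2.1 - t.1 + 1) (t.2.1 + 1) 1)) g.1).isEmpty &&
     (PySem.Set.inter (PySem.Set.ofList (PySem.List.pyRange (t.2.2 - t.1 + 1) (t.2.2 + 1) 1)) g.2.1).isEmpty then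
    (PySem.Set.union g.1 (PySem.Set.ofList (PySem.List.pyRange (t.2.1 - t.1 + 1) (t.2.1 + 1) 1)),
     PySem.Set.union g.2.1 (PySem.Set.ofList (PySem.List.pyRange (t.2.2 - t.1 + 1) (t.2.2 + 1) 1)),
     g.2.2 + t.1)
  else g

def pvGreedy (l : List (Int × Int × Int)) : Int :=
  (l.foldl pvGreedyStep (PySem.Set.empty, PySem.Set.empty, 0)).2.2

theorem pvPortFold (w1 w2 : List String) :
    (PySem.List.pyRange 1 ((w1.length : Int) + 1) 1).foldl
      (fun st i => (PySem.List.pyRange 1 ((w2.length : Int) + 1) 1).foldl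
        (fun st j => pvABody w1 w2 i st j) st)
      (List.replicate ((w1.length : Int) + 1).toNat
        (List.replicate ((w2.length : Int) + 1).toNat (0 : Int)),
       ([] : List (Int × Int × Int)))
    = (pvDpAt w1 w2 w1.length, pvM w1 w2) := by
  have e1 : ((w1.length : Int) + 1).toNat = w1.length + 1 := by omega
  have e2 : ((w2.length : Int) + 1).toNat = w2.length + 1 := by omega
  rw [e1, e2, pvRange1, pvRange1, show List.replicate (w2.length + 1) (0:Int) = pvZeroRow w2.length from rfl,
    ← pvDpAt_zero, List.foldl_map]
  simp only [List.foldl_map]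
  exact pvAOuter w1 w2 w1.length (le_refl _)

theorem pvA_eq (w1 w2 : List String) :
    word_acs_py w1 w2 =
      if (w1.length : Int) = 0 ∨ (w2.length : Int) = 0 then 0
      else pvGreedy (PySem.List.sorted (pvM w1 w2) (fun x => -x.1) false) := by
  by_cases hg : (w1.length : Int) = 0 ∨ (w2.length : Int) = 0
  · rw [if_pos hg]
    simp only [word_acs_py]
    rw [if_pos hg]
  · rw [if_neg hg]
    simp only [word_acs_py]
    rw [if_neg hg]
    have h := pvPortFold w1 w2
    show pvGreedy (PySem.List.sorted
      (((PySem.List.pyRange 1 ((w1.length : Int) + 1) 1).foldl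
        (fun st i => (PySem.List.pyRange 1 ((w2.length : Int) + 1) 1).foldl
          (fun st j => pvABody w1 w2 i st j) st)
        (List.replicate ((w1.length : Int) + 1).toNat
          (List.replicate ((w2.length : Int) + 1).toNat (0 : Int)),
         ([] : List (Int × Int × Int)))).2) (fun x => -x.1) false) = _
    rw [h]

theorem pvM_ge_one (w1 w2 : List String) : ∀ x ∈ pvM w1 w2, 1 ≤ x.1 := by
  intro x hx
  rw [pvM, pvFlatTo, List.mem_flatMap] at hx
  obtain ⟨i, _, hx⟩ := hx
  rw [pvMatchRow, List.mem_map] at hx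
  obtain ⟨j, _, he⟩ := hx
  have := pvRowAt_nonneg w1 w2 i j
  rw [← he]
  simpa using this

theorem pvM_nil (w1 w2 : List String) (h : w1.length = 0 ∨ w2.length = 0) :
    pvM w1 w2 = [] := by
  rcases h with h | h
  · rw [pvM, h]; rfl
  · simp [pvM, pvFlatTo, pvMatchRow, h]

-- ---- B side: the backward-walk run equals the dp value ----

theorem pvRunShiftAux (w1 w2 : List String) :
    ∀ (n : Nat) (i j k : Int), (i + 1 - k).toNat ≤ n →
      pvRunAux w1 w2 (i + 1) (j + 1) (k + 1) = pvRunAux w1 w2 i j k + 1 := by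
  intro n
  induction n with
  | zero =>
    intro i j k h
    conv_lhs => rw [pvRunAux.eq_def]
    conv_rhs => rw [pvRunAux.eq_def]
    rw [dif_neg (by intro hc; have := hc.1; omega),
      dif_neg (by intro hc; have := hc.1; omega)]
  | succ n ih =>
    intro i j k h
    conv_lhs => rw [pvRunAux.eq_def]
    conv_rhs => rw [pvRunAux.eq_def]
    have e1 : i + 1 - (k + 1) = i - k := by ring
    have e2 : j + 1 - (k + 1) = j - k := by ring
    by_cases hc : k ≤ i ∧ k ≤ j ∧ PySem.List.pyGetD w1 (i - k) "" = PySem.List.pyGetD w2 (j - k) ""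
    · rw [dif_pos (show k + 1 ≤ i + 1 ∧ k + 1 ≤ j + 1 ∧
          PySem.List.pyGetD w1 (i + 1 - (k + 1)) "" = PySem.List.pyGetD w2 (j + 1 - (k + 1)) "" from
          ⟨by omega, by omega, by rw [e1, e2]; exact hc.2.2⟩), dif_pos hc]
      exact ih i j (k + 1) (by omega)
    · rw [dif_neg (by rw [e1, e2]; intro hc'; exact hc ⟨by omega, by omega, hc'.2.2⟩), dif_neg hc]

theorem pvRunShift (w1 w2 : List String) (i j k : Int) :
    pvRunAux w1 w2 (i + 1) (j + 1) (k + 1) = pvRunAux w1 w2 i j k + 1 :=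
  pvRunShiftAux w1 w2 (i + 1 - k).toNat i j k (le_refl _)

theorem pvRun_eq_dp (w1 w2 : List String) :
    ∀ (i j : Nat), j < w2.length →
      pvRunAux w1 w2 (i : Int) (j : Int) 1 = (pvRowAt w1 w2 i).getD j 0 + 1 := by
  intro i
  induction i with
  | zero =>
    intro j hj
    conv_lhs => rw [pvRunAux.eq_def]
    rw [dif_neg (by intro hc; have := hc.1; omega)]
    simp [pvRowAt, pvZeroRow]
  | succ i ih =>
    intro j hj
    cases j with
    | zero =>
      conv_lhs => rw [pvRunAux.eq_def]
      rw [dif_neg (by intro hc; have := hc.2.1; omega)]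
      simp [pvRowAt, pvNextRow]
    | succ j =>
      have hj' : j < w2.length := by omega
      have ei : ((i + 1 : Nat) : Int) = (i : Int) + 1 := by push_cast; ring
      have ej : ((j + 1 : Nat) : Int) = (j : Int) + 1 := by push_cast; ring
      rw [ei, ej]
      conv_lhs => rw [pvRunAux.eq_def]
      have eg1 : (i : Int) + 1 - 1 = (i : Int) := by ring
      have eg2 : (j : Int) + 1 - 1 = (j : Int) := by ring
      have hrow : pvRowAt w1 w2 (i + 1) = pvNextRow w2 (pvRowAt w1 w2 i) (w1.getD i "") := rfl
      by_cases heq : w1.getD i "" = w2.getD j ""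
      · rw [dif_pos (by
          refine ⟨by omega, by omega, ?_⟩
          rw [eg1, eg2, PySem.List.pyGetD_natCast, PySem.List.pyGetD_natCast]
          exact heq)]
        rw [pvRunShift, ih j hj',
          hrow, pvNextRow_getD_succ _ _ _ j hj', if_pos heq]
      · rw [dif_neg (by
          intro hc
          apply heq
          have := hc.2.2
          rw [eg1, eg2, PySem.List.pyGetD_natCast, PySem.List.pyGetD_natCast] at this
          exact this)]
        rw [hrow, pvNextRow_getD_succ _ _ _ j hj', if_neg heq]
        omega

theorem pvCands_eq (w1 w2 : List String) :
    ((PySem.List.pyRange 0 (PySem.List.len w1) 1).foldl (fun cs i =>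
      (PySem.List.pyRange 0 (PySem.List.len w2) 1).foldl (fun cs j =>
        if PySem.List.pyGetD w1 i "" = PySem.List.pyGetD w2 j "" then
          cs ++ [(pvRunAux w1 w2 i j 1, i, j)]
        else cs) cs) ([] : List (Int × Int × Int)))
    = pvM w1 w2 := by
  rw [show PySem.List.len w1 = ((w1.length : Nat) : Int) from rfl,
    show PySem.List.len w2 = ((w2.length : Nat) : Int) from rfl,
    PySem.List.pyRange_zero_natCast, PySem.List.pyRange_zero_natCast,
    List.foldl_map]
  simp only [List.foldl_map, PySem.List.pyGetD_natCast]
  have hinner : ∀ (i : Nat) (cs : List (Int × Int × Int)),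
      (List.range w2.length).foldl (fun cs (j : Nat) =>
        if w1.getD i "" = w2.getD j "" then
          cs ++ [(pvRunAux w1 w2 (i : Int) (j : Int) 1, (i : Int), (j : Int))]
        else cs) cs
      = cs ++ pvMatchRow w2 (pvRowAt w1 w2 i) (w1.getD i "") (i : Int) := by
    intro i cs
    rw [show (fun cs (j : Nat) =>
        if w1.getD i "" = w2.getD j "" then
          cs ++ [(pvRunAux w1 w2 (i : Int) (j : Int) 1, (i : Int), (j : Int))]
        else cs)
      = (fun cs (j : Nat) =>
        if (decide (w1.getD i "" = w2.getD j "")) = true then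
          cs ++ [(pvRunAux w1 w2 (i : Int) (j : Int) 1, (i : Int), (j : Int))]
        else cs) from by funext cs j; simp]
    rw [PySem.List.foldl_append_if]
    congr 1
    rw [pvMatchRow]
    apply List.map_congr_left
    intro j hj
    have hj2 : j < w2.length := List.mem_range.mp (List.mem_filter.mp hj).1
    rw [pvRun_eq_dp w1 w2 i j hj2]
  have houter : ∀ (r : Nat) (cs : List (Int × Int × Int)),
      (List.range r).foldl (fun cs (i : Nat) =>
        (List.range w2.length).foldl (fun cs (j : Nat) =>
          if w1.getD i "" = w2.getD j "" then
            cs ++ [(pvRunAux w1 w2 (i : Int) (j : Int) 1, (i : Int), (j : Int))]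
          else cs) cs) cs
      = cs ++ pvFlatTo w1 w2 r := by
    intro r
    induction r with
    | zero => intro cs; simp [pvFlatTo]
    | succ r ih =>
      intro cs
      rw [List.range_succ, List.foldl_append, ih, List.foldl_cons, List.foldl_nil,
        hinner, pvFlatTo_succ, List.append_assoc]
  have := houter w1.length []
  rw [List.nil_append] at this
  exact this

-- ---- the greedy pass of A is the repeated longest-first selection of B ----

theorem pvTest (r : List Int) (u : PySem.Set Int) :
    (PySem.Set.inter (PySem.Set.ofList r) u).isEmpty = r.all (fun t => !(PySem.Set.contains u t)) := by
  rw [Bool.eq_iff_iff]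
  simp [PySem.Set.inter, List.isEmpty_iff, List.filter_eq_nil_iff, PySem.Set.mem_ofList,
    List.all_eq_true]

theorem pvUnion (u : PySem.Set Int) (r : List Int) :
    PySem.Set.union u (PySem.Set.ofList r) = PySem.Set.update u r := by
  rw [PySem.Set.union, PySem.Set.update_eq_append_filter, PySem.Set.update_eq_append_filter,
    PySem.Set.ofList_ofList]

theorem pvStepEq (g : PySem.Set Int × PySem.Set Int × Int) (x : Int × Int × Int) :
    pvGreedyStep g x = if pvFree g x then pvApply g x else g := by
  rw [pvGreedyStep, pvFree, pvApply, pvTest, pvTest, pvUnion, pvUnion]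

theorem pvFree_mono (g g' : PySem.Set Int × PySem.Set Int × Int)
    (h1 : ∀ t : Int, t ∈ g.1 → t ∈ g'.1) (h2 : ∀ t : Int, t ∈ g.2.1 → t ∈ g'.2.1)
    (x : Int × Int × Int) (hf : pvFree g' x = true) : pvFree g x = true := by
  rw [pvFree, Bool.and_eq_true, List.all_eq_true, List.all_eq_true] at hf ⊢
  constructor
  · intro t ht
    have := hf.1 t ht
    simp only [Bool.not_eq_eq_eq_not, Bool.not_true, PySem.Set.contains_eq_listContains] at this ⊢
    simp only [List.contains_eq_mem, decide_eq_false_iff_not] at this ⊢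
    exact fun hm => this (h1 t hm)
  · intro t ht
    have := hf.2 t ht
    simp only [Bool.not_eq_eq_eq_not, Bool.not_true, PySem.Set.contains_eq_listContains] at this ⊢
    simp only [List.contains_eq_mem, decide_eq_false_iff_not] at this ⊢
    exact fun hm => this (h2 t hm)

theorem pvApply_sub1 (g : PySem.Set Int × PySem.Set Int × Int) (x : Int × Int × Int) :
    ∀ t : Int, t ∈ g.1 → t ∈ (pvApply g x).1 := by
  intro t ht
  rw [pvApply]
  exact (PySem.Set.mem_update _ _ _).mpr (Or.inl ht)

theorem pvApply_sub2 (g : PySem.Set Int × PySem.Set Int × Int) (x : Int × Int × Int) :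
    ∀ t : Int, t ∈ g.2.1 → t ∈ (pvApply g x).2.1 := by
  intro t ht
  rw [pvApply]
  exact (PySem.Set.mem_update _ _ _).mpr (Or.inl ht)

theorem pvFree_apply_self (g : PySem.Set Int × PySem.Set Int × Int) (x : Int × Int × Int)
    (hx : 1 ≤ x.1) : pvFree (pvApply g x) x = false := by
  have hmem : x.2.1 ∈ PySem.List.pyRange (x.2.1 - x.1 + 1) (x.2.1 + 1) 1 :=
    PySem.List.mem_pyRange_one.mpr ⟨by omega, by omega⟩
  have hin : x.2.1 ∈ (pvApply g x).1 := by
    rw [pvApply]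
    exact (PySem.Set.mem_update _ _ _).mpr (Or.inr hmem)
  rw [pvFree]
  apply Bool.and_eq_false_iff.mpr
  left
  rw [← Bool.not_eq_true, List.all_eq_true]
  intro hall
  have := hall x.2.1 hmem
  rw [Bool.not_eq_eq_eq_not, Bool.not_true, ← Bool.not_eq_true,
    PySem.Set.contains_iff] at this
  exact this hin

theorem pvFoldl_no_free : ∀ (s : List (Int × Int × Int)) (g : PySem.Set Int × PySem.Set Int × Int),
    (∀ x ∈ s, pvFree g x = false) → s.foldl pvGreedyStep g = g := by
  intro s
  induction s with
  | nil => intro g _; rfl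
  | cons a t ih =>
    intro g h
    rw [List.foldl_cons, pvStepEq, h a (by simp), if_neg (by simp)]
    exact ih g (fun x hx => h x (by simp [hx]))

theorem pvFoldl_advance : ∀ (s : List (Int × Int × Int)) (g : PySem.Set Int × PySem.Set Int × Int)
    (x : Int × Int × Int), s.find? (pvFree g) = some x → (∀ y ∈ s, 1 ≤ y.1) →
    s.foldl pvGreedyStep g = s.foldl pvGreedyStep (pvApply g x) := by
  intro s
  induction s with
  | nil => intro g x hf; simp at hf
  | cons a t ih =>
    intro g x hf hk
    by_cases ha : pvFree g a = true
    · rw [List.find?_cons_of_pos (h := ha), Option.some_inj] at hf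
      subst hf
      rw [List.foldl_cons, List.foldl_cons, pvStepEq, if_pos ha, pvStepEq,
        pvFree_apply_self g a (hk a (by simp)), if_neg (by simp)]
    · rw [List.find?_cons_of_neg (h := by simp [ha])] at hf
      have haf : pvFree (pvApply g x) a = false := by
        rcases Bool.eq_false_or_eq_true (pvFree (pvApply g x) a) with h | h
        · exact absurd (pvFree_mono g (pvApply g x) (pvApply_sub1 g x) (pvApply_sub2 g x) a h) ha
        · exact h
      rw [List.foldl_cons, List.foldl_cons, pvStepEq, if_neg (by simp [ha]), pvStepEq, haf,
        if_neg (by simp)]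
      exact ih g x hf (fun y hy => hk y (by simp [hy]))

theorem pvCountP_lt : ∀ (s : List (Int × Int × Int)) (p p' : (Int × Int × Int) → Bool),
    (∀ y ∈ s, p' y = true → p y = true) → ∀ x ∈ s, p x = true → p' x = false →
    s.countP p' < s.countP p := by
  intro s
  induction s with
  | nil => intro p p' _ x hx; simp at hx
  | cons a t ih =>
    intro p p' hmono x hx hpx hpx'
    rw [List.countP_cons, List.countP_cons]
    rcases List.mem_cons.mp hx with rfl | hxt
    · have h1 : t.countP p' ≤ t.countP p := by
        apply List.countP_mono_left
        intro y hy
        exact hmono y (by simp [hy])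
      rw [hpx, hpx']
      simp
      omega
    · have hlt := ih p p' (fun y hy => hmono y (by simp [hy])) x hxt hpx hpx'
      have hhead : (if p' a = true then 1 else 0) ≤ (if p a = true then 1 else 0) := by
        by_cases h : p' a = true
        · rw [if_pos h, if_pos (hmono a (by simp) h)]
        · rw [if_neg h]; split <;> omega
      omega

-- insertBy inserts after the stable prefix (the elements x must not go before)
theorem pvInsertBy_eq (before : (Int × Int × Int) → (Int × Int × Int) → Bool)
    (x : Int × Int × Int) :
    ∀ l : List (Int × Int × Int),
      PySem.List.insertBy before x l
        = l.takeWhile (fun a => !before x a) ++ x :: l.dropWhile (fun a => !before x a) := by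
  intro l
  induction l with
  | nil => simp [PySem.List.insertBy]
  | cons a as ih =>
    by_cases h : before x a = true
    · simp [PySem.List.insertBy, h]
    · simp only [Bool.not_eq_true] at h
      simp [PySem.List.insertBy, h, ih]

theorem pvDropWhile_lt (x : Int × Int × Int) :
    ∀ s : List (Int × Int × Int), s.Pairwise (fun a b => -a.1 ≤ -b.1) →
      ∀ a ∈ s.dropWhile (fun a => !decide (-x.1 < -a.1)), a.1 < x.1 := by
  intro s
  induction s with
  | nil => intro _ a ha; simp at ha
  | cons h t ih =>
    intro hp a ha
    rw [List.pairwise_cons] at hp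
    rw [List.dropWhile_cons] at ha
    by_cases hq : (!decide (-x.1 < -h.1)) = true
    · rw [if_pos hq] at ha
      exact ih hp.2 a ha
    · rw [if_neg hq] at ha
      have hh : h.1 < x.1 := by
        simp only [Bool.not_eq_true', decide_eq_false_iff_not, not_lt, not_le] at hq
        omega
      rcases List.mem_cons.mp ha with rfl | hat
      · exact hh
      · have := hp.1 a hat
        omega

theorem pvScanEq (free : (Int × Int × Int) → Bool) (l : List (Int × Int × Int)) :
    l.foldl (pvScanStep free) none
      = (PySem.List.sorted l (fun x => -x.1) false).find? free := by
  induction l using List.reverseRecOn with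
  | nil => rfl
  | append_singleton l x ih =>
    have hs : PySem.List.sorted (l ++ [x]) (fun y => -y.1) false
        = PySem.List.insertBy (fun a b => decide (-a.1 < -b.1)) x
            (PySem.List.sorted l (fun y => -y.1) false) := by
      rw [PySem.List.sorted_eq_foldl_insertBy, List.foldl_append, List.foldl_cons, List.foldl_nil,
        ← PySem.List.sorted_eq_foldl_insertBy]
    rw [List.foldl_append, List.foldl_cons, List.foldl_nil, ih, hs,
      pvInsertBy_eq _ x (PySem.List.sorted l (fun y => -y.1) false)]
    set s := PySem.List.sorted l (fun y => -y.1) false with hsdef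
    have hp : s.Pairwise (fun a b => -a.1 ≤ -b.1) := PySem.List.sorted_pairwise l (fun y => -y.1)
    set P := s.takeWhile (fun a => !decide (-x.1 < -a.1)) with hP
    set Q := s.dropWhile (fun a => !decide (-x.1 < -a.1)) with hQ
    have hsplit : P ++ Q = s := List.takeWhile_append_dropWhile
    rw [List.find?_append]
    have hfind : s.find? free = (P.find? free).or (Q.find? free) := by
      rw [← hsplit, List.find?_append]
    cases hfp : P.find? free with
    | some b =>
      have hbP : b ∈ P := List.mem_of_find?_eq_some hfp
      have hble : x.1 ≤ b.1 := by
        have := List.mem_takeWhile_imp hbP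
        simp only [Bool.not_eq_true', decide_eq_false_iff_not, not_lt] at this
        omega
      rw [hfind, hfp, Option.some_or, pvScanStep, if_pos hble]
      simp
    | none =>
      rw [hfind, hfp, Option.none_or, Option.none_or, List.find?_cons]
      cases hfx : free x with
      | true =>
        cases hfq : Q.find? free with
        | none => rw [pvScanStep.eq_def]; simp [hfx]
        | some b =>
          have hbQ : b ∈ Q := List.mem_of_find?_eq_some hfq
          have hblt : b.1 < x.1 := pvDropWhile_lt x s hp b hbQ
          rw [pvScanStep]
          rw [if_neg (by simp; omega), if_pos hfx]
      | false =>
        cases hfq : Q.find? free with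
        | none => rw [pvScanStep.eq_def]; simp [hfx]
        | some b =>
          have hbQ : b ∈ Q := List.mem_of_find?_eq_some hfq
          have hblt : b.1 < x.1 := pvDropWhile_lt x s hp b hbQ
          rw [pvScanStep]
          rw [if_neg (by simp; omega), if_neg (by simp [hfx])]

theorem pvLoop_eq (l : List (Int × Int × Int)) (hk : ∀ y ∈ l, 1 ≤ y.1) :
    ∀ (fuel : Nat) (g : PySem.Set Int × PySem.Set Int × Int),
      (PySem.List.sorted l (fun x => -x.1) false).countP (pvFree g) < fuel →
      pvSelectLoop l fuel g = (PySem.List.sorted l (fun x => -x.1) false).foldl pvGreedyStep g := by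
  have hks : ∀ y ∈ PySem.List.sorted l (fun x => -x.1) false, 1 ≤ y.1 := by
    intro y hy
    exact hk y ((PySem.List.mem_sorted l _ false y).mp hy)
  intro fuel
  induction fuel with
  | zero => intro g hc; omega
  | succ fuel ih =>
    intro g hc
    rw [pvSelectLoop, pvScan, pvScanEq]
    cases hf : (PySem.List.sorted l (fun x => -x.1) false).find? (pvFree g) with
    | none =>
      show g = _
      rw [pvFoldl_no_free _ g (by
        intro x hx
        have := List.find?_eq_none.mp hf x hx
        simpa using this)]
    | some x =>
      show pvSelectLoop l fuel (pvApply g x) = _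
      have hxs : x ∈ PySem.List.sorted l (fun x => -x.1) false := List.mem_of_find?_eq_some hf
      have hx1 : 1 ≤ x.1 := hks x hxs
      have hdec : (PySem.List.sorted l (fun x => -x.1) false).countP (pvFree (pvApply g x))
          < (PySem.List.sorted l (fun x => -x.1) false).countP (pvFree g) := by
        apply pvCountP_lt _ _ _ _ x hxs (List.find?_some hf) (pvFree_apply_self g x hx1)
        intro y _ hy
        exact pvFree_mono g (pvApply g x) (pvApply_sub1 g x) (pvApply_sub2 g x) y hy
      rw [ih (pvApply g x) (by omega),
        ← pvFoldl_advance _ g x hf hks]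

theorem pvMain (w1 w2 : List String) : word_acs_py w1 w2 = word_acs_py_alt w1 w2 := by
  rw [pvA_eq]
  simp only [word_acs_py_alt]
  rw [pvCands_eq]
  have hlen : (PySem.List.sorted (pvM w1 w2) (fun x => -x.1) false).countP
      (pvFree (PySem.Set.empty, PySem.Set.empty, (0 : Int))) < (pvM w1 w2).length + 1 := by
    have h1 := List.countP_le_length
      (p := pvFree (PySem.Set.empty, PySem.Set.empty, (0 : Int)))
      (l := PySem.List.sorted (pvM w1 w2) (fun x => -x.1) false)
    rw [PySem.List.length_sorted] at h1
    omega
  rw [pvLoop_eq (pvM w1 w2) (pvM_ge_one w1 w2) ((pvM w1 w2).length + 1) _ hlen]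
  by_cases hg : (w1.length : Int) = 0 ∨ (w2.length : Int) = 0
  · rw [if_pos hg]
    have hnil : pvM w1 w2 = [] := by
      apply pvM_nil
      rcases hg with h | h
      · left; exact_mod_cast h
      · right; exact_mod_cast h
    rw [hnil]
    rfl
  · rw [if_neg hg]
    rfl

-- ===== VERDICT (by name: the statement is the Claim_ definition above) =====
theorem word_acs_py_spec : Claim_equal_word_acs_py := by
  intro words1 words2 _
  show word_acs_py words1 words2 = word_acs_py_alt words1 words2
  exact pvMain words1 words2
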